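-- pv_equiv track=rewrite | github.com/RTrentJones/BAMCP | src/bamcp/tools.py | _detect_homopolymer
-- ===== SOURCE A (Python) =====
-- def _detect_homopolymer(seq: str, pos: int) -> int:
--     """Detect homopolymer run length at a given position.
--
--     Args:
--         seq: Reference sequence.
--         pos: Position within the sequence (0-indexed).
--
--     Returns:
--         Length of homopolymer run containing the position.
--     """
--     if not seq or pos < 0 or pos >= len(seq):
--         return 0
--
--     base = seq[pos].upper()
--     if base not in "ACGT":
--         return 0
--
--     length = 1
--
--     # Extend left
--     i = pos - 1
--     while i >= 0 and seq[i].upper() == base: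
--         length += 1
--         i -= 1
--
--     # Extend right
--     i = pos + 1
--     while i < len(seq) and seq[i].upper() == base:
--         length += 1
--         i += 1
--
--     return length
-- ===== SOURCE B (Python) =====
-- from itertools import groupby
--
--
-- def _detect_homopolymer(seq: str, pos: int) -> int:
--     """Detect homopolymer run length at a given position (groupby-based)."""
--     if not seq or pos < 0 or pos >= len(seq):
--         return 0
--     start = 0
--     for key, grp in groupby(seq, key=str.upper):
--         n = sum(1 for _ in grp)
--         if pos < start + n:
--             return n if key in "ACGT" else 0
--         start += n
--     return 0  # unreachable
-- ===== Notes on version B (the rewrite author's own statement) =====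
-- stated objective: idiomatic
-- what changed: Replaces the two hand-written extend-left/extend-right index loops with a single itertools.groupby pass that walks the uppercased runs and returns the length of the run containing pos (0 if its key is not in ACGT).
import Mathlib
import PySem

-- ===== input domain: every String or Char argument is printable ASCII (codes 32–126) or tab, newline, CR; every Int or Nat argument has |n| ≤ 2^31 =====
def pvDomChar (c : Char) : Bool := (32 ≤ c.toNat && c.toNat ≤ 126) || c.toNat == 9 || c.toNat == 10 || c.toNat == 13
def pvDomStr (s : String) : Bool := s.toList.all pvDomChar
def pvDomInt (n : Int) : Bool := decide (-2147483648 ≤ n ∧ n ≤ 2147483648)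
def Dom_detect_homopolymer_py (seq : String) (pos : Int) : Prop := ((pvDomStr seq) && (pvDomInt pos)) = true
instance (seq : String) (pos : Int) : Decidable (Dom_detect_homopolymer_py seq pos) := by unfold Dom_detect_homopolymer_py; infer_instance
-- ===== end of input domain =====

-- B replaces A's two hand-written extend-left/extend-right index loops with one
-- itertools.groupby-style walk over the uppercased runs (idiomatic; not faster).

-- ===== PORT A =====
-- while i >= 0 and seq[i].upper() == base: length += 1; i -= 1   (called with i = pos-1, encoded as Nat pos)
def pvLeft (cs : List Char) (base : Char) : Nat → Nat
  | 0 => 0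
  | n + 1 => if (cs.getD n ' ').toUpper = base then pvLeft cs base n + 1 else 0

-- while i < len(seq) and seq[i].upper() == base: length += 1; i += 1
def pvRight (cs : List Char) (base : Char) (i : Nat) : Nat :=
  if _h : i < cs.length then
    if (cs.getD i ' ').toUpper = base then pvRight cs base (i + 1) + 1 else 0
  else 0
termination_by cs.length - i

def detect_homopolymer_py (seq : String) (pos : Int) : Int :=
  if seq.toList.length = 0 ∨ pos < 0 ∨ (seq.toList.length : Int) ≤ pos then 0
  else if "ACGT".toList.contains (seq.toList.getD pos.toNat ' ').toUpper then
    ((1 + pvLeft seq.toList (seq.toList.getD pos.toNat ' ').toUpper pos.toNat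
        + pvRight seq.toList (seq.toList.getD pos.toNat ' ').toUpper (pos.toNat + 1) : Nat) : Int)
  else 0

-- ===== PORT B =====
-- itertools.groupby(seq, key=str.upper): maximal runs of equal uppercased chars with their lengths
def pvRuns : List Char → List (Char × Nat)
  | [] => []
  | c :: rest =>
      (c, (rest.takeWhile (· == c)).length + 1) :: pvRuns (rest.dropWhile (· == c))
termination_by l => l.length
decreasing_by simpa using Nat.lt_succ_of_le (List.length_dropWhile_le _ _)

-- the for-loop over groups with the running start index
def pvFind : List (Char × Nat) → Nat → Nat → Char × Nat
  | [], _, _ => (' ', 0)   -- the loop falls through only when pos is past the end (unreachable under the guard)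
  | (k, n) :: gs, start, p => if p < start + n then (k, n) else pvFind gs (start + n) p

def detect_homopolymer_py_alt (seq : String) (pos : Int) : Int :=
  if seq.toList.length = 0 ∨ pos < 0 ∨ (seq.toList.length : Int) ≤ pos then 0
  else if "ACGT".toList.contains (pvFind (pvRuns (seq.toList.map Char.toUpper)) 0 pos.toNat).1 then
    ((pvFind (pvRuns (seq.toList.map Char.toUpper)) 0 pos.toNat).2 : Int)
  else 0

-- ===== PRECONDITION & SPEC =====
def Spec_detect_homopolymer_py (seq : String) (pos : Int) (out : Int) : Prop := out = detect_homopolymer_py_alt seq pos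
instance (seq : String) (pos : Int) (out : Int) : Decidable (Spec_detect_homopolymer_py seq pos out) := by unfold Spec_detect_homopolymer_py; infer_instance

-- ===== CLAIM (what is proved, stated in full; the proofs are below) =====
def Claim_equal_detect_homopolymer_py : Prop := ∀ (seq : String) (pos : Int), Dom_detect_homopolymer_py seq pos → Spec_detect_homopolymer_py seq pos (detect_homopolymer_py seq pos)

-- ===== LEMMAS AND PROOFS =====

-- all elements equal c and c ≠ b: takeWhile (· == b) takes nothing
lemma takeWhile_eq_nil_of_ne {c b : Char} (L : List Char) (hall : ∀ x ∈ L, x = c)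
    (hne : c ≠ b) : L.takeWhile (· == b) = [] := by
  cases L with
  | nil => rfl
  | cons x xs =>
    have hx : x = c := hall x (by simp)
    simp [hx, hne]

-- the first element dropWhile keeps fails the predicate
lemma dropWhile_head_false {p : Char → Bool} :
    ∀ (l : List Char) (x : Char) (xs : List Char), l.dropWhile p = x :: xs → p x = false := by
  intro l
  induction l with
  | nil => intro x xs h; simp at h
  | cons a as ih =>
    intro x xs h
    rw [List.dropWhile_cons] at h
    by_cases hpa : p a = true
    · rw [if_pos hpa] at h
      exact ih _ _ h
    · rw [if_neg hpa] at h
      cases h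
      simpa using hpa

-- A's left loop counts a reversed takeWhile over the uppercased prefix
lemma pvLeft_eq (cs : List Char) (b : Char) (p : Nat) (hp : p ≤ cs.length) :
    pvLeft cs b p =
      (((cs.map Char.toUpper).take p).reverse.takeWhile (· == b)).length := by
  induction p with
  | zero => simp [pvLeft]
  | succ n ih =>
    have hn : n < cs.length := by omega
    have hup : (cs.map Char.toUpper).take (n + 1)
        = (cs.map Char.toUpper).take n ++ [(cs[n]'hn).toUpper] := by
      rw [List.take_add_one, List.getElem?_eq_getElem (by simpa using hn)]
      simp
    rw [hup, List.reverse_append]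
    simp only [List.reverse_singleton, List.singleton_append, List.takeWhile_cons]
    simp only [pvLeft, List.getD_eq_getElem?_getD, List.getElem?_eq_getElem hn,
      Option.getD_some]
    by_cases hc : cs[n].toUpper = b
    · simp only [hc, beq_self_eq_true, if_true, List.length_cons]
      rw [ih (by omega)]
    · simp only [hc, if_false]
      have hb : (cs[n].toUpper == b) = false := by simp [hc]
      simp [hb]

-- A's right loop counts a takeWhile over the uppercased suffix
lemma pvRight_eq (cs : List Char) (b : Char) (i : Nat) :
    pvRight cs b i =
      (((cs.map Char.toUpper).drop i).takeWhile (· == b)).length := by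
  have H : ∀ k i, cs.length - i ≤ k → pvRight cs b i =
      (((cs.map Char.toUpper).drop i).takeWhile (· == b)).length := by
    intro k
    induction k with
    | zero =>
      intro i hi
      rw [pvRight, dif_neg (by omega), List.drop_eq_nil_of_le (by simp; omega)]
      rfl
    | succ k ih =>
      intro i hi
      by_cases h : i < cs.length
      · have hdrop : (cs.map Char.toUpper).drop i
            = (cs[i]'h).toUpper :: (cs.map Char.toUpper).drop (i + 1) := by
          rw [List.drop_eq_getElem_cons (by simpa using h)]
          simp
        rw [pvRight, dif_pos h, hdrop, List.takeWhile_cons]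
        simp only [List.getD_eq_getElem?_getD, List.getElem?_eq_getElem h, Option.getD_some]
        by_cases hc : (cs[i]'h).toUpper = b
        · simp only [hc, beq_self_eq_true, if_true, List.length_cons]
          rw [ih (i + 1) (by omega)]
        · simp only [hc, if_false]
          have hb : ((cs[i]'h).toUpper == b) = false := by simp [hc]
          simp [hb]
      · rw [pvRight, dif_neg h, List.drop_eq_nil_of_le (by simp; omega)]
        rfl
  exact H (cs.length - i) i le_rfl

lemma pvFind_shift (gs : List (Char × Nat)) (s p d : Nat) :
    pvFind gs (s + d) (p + d) = pvFind gs s p := by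
  induction gs generalizing s with
  | nil => rfl
  | cons g gs ih =>
    obtain ⟨k, n⟩ := g
    simp only [pvFind]
    by_cases h : p < s + n
    · rw [if_pos (by omega), if_pos h]
    · rw [if_neg (by omega), if_neg h]
      have : s + d + n = s + n + d := by omega
      rw [this, ih]

-- the group containing position p is exactly A's left+1+right run around p
lemma pvFind_runs_aux : ∀ (fuel : Nat) (l : List Char), l.length ≤ fuel → ∀ p, p < l.length →
    pvFind (pvRuns l) 0 p =
      (l.getD p ' ',
        ((l.take p).reverse.takeWhile (· == l.getD p ' ')).length + 1 +
        ((l.drop (p + 1)).takeWhile (· == l.getD p ' ')).length) := by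
  intro fuel
  induction fuel with
  | zero =>
    intro l hl p hp
    omega
  | succ fuel ih =>
    intro l hl p hp
    match l with
    | [] => simp at hp
    | c :: rest =>
      obtain ⟨t, r, htr, htc, hrc, hruns⟩ :
          ∃ t r, rest = t ++ r ∧ (∀ x ∈ t, x = c) ∧
            (∀ x xs, r = x :: xs → x ≠ c) ∧
            pvRuns (c :: rest) = (c, t.length + 1) :: pvRuns r := by
        refine ⟨rest.takeWhile (· == c), rest.dropWhile (· == c),
          (List.takeWhile_append_dropWhile).symm, ?_, ?_, ?_⟩
        · intro x hx
          simpa using List.mem_takeWhile_imp hx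
        · intro x xs h hxc
          have := dropWhile_head_false rest x xs h
          simp [hxc] at this
        · rw [pvRuns]
      have hlen : rest.length = t.length + r.length := by
        rw [htr, List.length_append]
      rw [hruns]
      by_cases hcase : p < t.length + 1
      · -- p lies in the first run
        have hple : p ≤ t.length := by omega
        rw [pvFind, if_pos (by omega)]
        have comp1 : (c :: rest).getD p ' ' = c := by
          cases p with
          | zero => rfl
          | succ q =>
            have hq : q < t.length := by omega
            rw [List.getD_cons_succ, htr, List.getD_eq_getElem?_getD,
              List.getElem?_append_left hq, List.getElem?_eq_getElem hq,
              Option.getD_some]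
            exact htc _ (List.getElem_mem _)
        rw [comp1]
        have hallp : ∀ x ∈ ((c :: rest).take p).reverse, (x == c) = true := by
          intro x hx
          rw [List.mem_reverse] at hx
          cases p with
          | zero => simp at hx
          | succ q =>
            rw [List.take_succ_cons] at hx
            rcases List.mem_cons.mp hx with h | h
            · simp [h]
            · have hq : q < t.length := by omega
              have htk : rest.take q = t.take q := by
                rw [htr, List.take_append, Nat.sub_eq_zero_of_le (by omega),
                  List.take_zero, List.append_nil]
              rw [htk] at h
              simp [htc x (List.mem_of_mem_take h)]
        have comp2 : (((c :: rest).take p).reverse.takeWhile (· == c)).length = p := by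
          rw [List.takeWhile_eq_self_iff.mpr hallp]
          simp only [List.length_reverse, List.length_take, List.length_cons]
          omega
        have comp3 : (((c :: rest).drop (p + 1)).takeWhile (· == c)).length
            = t.length - p := by
          have hdrop : (c :: rest).drop (p + 1) = t.drop p ++ r := by
            rw [List.drop_succ_cons, htr, List.drop_append,
              Nat.sub_eq_zero_of_le hple, List.drop_zero]
          rw [hdrop, List.takeWhile_append]
          have hallt : (List.takeWhile (· == c) (t.drop p)).length = (t.drop p).length := by
            rw [List.takeWhile_eq_self_iff.mpr]
            intro x hx
            simp [htc x (List.mem_of_mem_drop hx)]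
          rw [if_pos hallt]
          have hrnil : List.takeWhile (· == c) r = [] := by
            cases hre : r with
            | nil => rfl
            | cons x xs =>
              have hxc := hrc x xs hre
              simp [hxc]
          rw [hrnil, List.append_nil, List.length_drop]
        rw [comp2, comp3]
        simp only [Prod.mk.injEq, true_and]
        omega
      · -- p lies past the first run: recurse into the tail groups
        have hp' : p - (t.length + 1) < r.length := by
          simp only [List.length_cons] at hp
          omega
        rw [pvFind, if_neg (by omega)]
        have hps : p = (p - (t.length + 1)) + (t.length + 1) := by omega
        rw [hps, pvFind_shift]
        rw [ih r (by simp only [List.length_cons] at hl; omega) _ hp']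
        have hl2 : c :: rest = (c :: t) ++ r := by
          rw [htr]
          rfl
        have comp1 : (c :: rest).getD ((p - (t.length + 1)) + (t.length + 1)) ' '
            = r.getD (p - (t.length + 1)) ' ' := by
          rw [hl2, List.getD_eq_getElem?_getD, List.getD_eq_getElem?_getD,
            List.getElem?_append_right (by simp)]
          have harith : (p - (t.length + 1)) + (t.length + 1) - (c :: t).length
              = p - (t.length + 1) := by
            simp only [List.length_cons]
            omega
          rw [harith]
        have comp3 : (c :: rest).drop ((p - (t.length + 1)) + (t.length + 1) + 1)
            = r.drop ((p - (t.length + 1)) + 1) := by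
          rw [hl2, List.drop_append, List.drop_eq_nil_of_le (by simp; omega),
            List.nil_append]
          have harith : (p - (t.length + 1)) + (t.length + 1) + 1 - (c :: t).length
              = (p - (t.length + 1)) + 1 := by
            simp only [List.length_cons]
            omega
          rw [harith]
        have htake : ((c :: rest).take ((p - (t.length + 1)) + (t.length + 1))).reverse
            = (r.take (p - (t.length + 1))).reverse ++ (c :: t).reverse := by
          rw [hl2, List.take_append, List.take_of_length_le (by simp),
            ← List.reverse_append]
          have harith : (p - (t.length + 1)) + (t.length + 1) - (c :: t).length
              = p - (t.length + 1) := by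
            simp only [List.length_cons]
            omega
          rw [harith]
        have comp2 : (((c :: rest).take ((p - (t.length + 1)) + (t.length + 1))).reverse.takeWhile
              (· == r.getD (p - (t.length + 1)) ' ')).length
            = ((r.take (p - (t.length + 1))).reverse.takeWhile
              (· == r.getD (p - (t.length + 1)) ' ')).length := by
          rw [htake, List.takeWhile_append]
          by_cases hfull : (List.takeWhile (· == r.getD (p - (t.length + 1)) ' ')
              (r.take (p - (t.length + 1))).reverse).length
              = (r.take (p - (t.length + 1))).reverse.length
          · rw [if_pos hfull]
            have hbase_ne : r.getD (p - (t.length + 1)) ' ' ≠ c := by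
              match hre : r, hp' with
              | x :: xs, _ =>
                have hxc := hrc x xs rfl
                cases hz : p - (t.length + 1) with
                | zero =>
                  simpa using hxc
                | succ q =>
                  have hfull' : List.takeWhile (· == (x :: xs).getD (q + 1) ' ')
                      ((x :: xs).take (q + 1)).reverse
                      = ((x :: xs).take (q + 1)).reverse :=
                    (List.takeWhile_prefix _).eq_of_length (by rw [← hz]; exact hfull)
                  have hall := List.takeWhile_eq_self_iff.mp hfull'
                  have hmem : x ∈ ((x :: xs).take (q + 1)).reverse := by
                    simp [List.take_succ_cons]
                  have hxb := hall _ hmem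
                  rw [beq_iff_eq] at hxb
                  rw [← hxb]
                  exact hxc
            have hnil : List.takeWhile (· == r.getD (p - (t.length + 1)) ' ')
                (c :: t).reverse = [] := by
              apply takeWhile_eq_nil_of_ne (c := c)
              · intro x hx
                rw [List.mem_reverse] at hx
                rcases List.mem_cons.mp hx with h | h
                · exact h
                · exact htc x h
              · exact fun h => hbase_ne h.symm
            rw [hnil, List.append_nil]
            exact hfull.symm
          · rw [if_neg hfull]
        rw [comp1, comp2, comp3]

lemma pvFind_runs (l : List Char) (p : Nat) (hp : p < l.length) :
    pvFind (pvRuns l) 0 p =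
      (l.getD p ' ',
        ((l.take p).reverse.takeWhile (· == l.getD p ' ')).length + 1 +
        ((l.drop (p + 1)).takeWhile (· == l.getD p ' ')).length) :=
  pvFind_runs_aux l.length l le_rfl p hp

-- ===== VERDICT (by name: the statement is the Claim_ definition above) =====
theorem detect_homopolymer_py_spec : Claim_equal_detect_homopolymer_py := by
  intro seq pos _
  unfold Spec_detect_homopolymer_py detect_homopolymer_py detect_homopolymer_py_alt
  set cs := seq.toList with hcs
  by_cases hg : cs.length = 0 ∨ pos < 0 ∨ (cs.length : Int) ≤ pos
  · rw [if_pos hg, if_pos hg]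
  · rw [if_neg hg, if_neg hg]
    rw [not_or, not_or] at hg
    simp only [not_lt, not_le] at hg
    obtain ⟨h0, hpos, hlt⟩ := hg
    have hp : pos.toNat < cs.length := by omega
    have hbase : (cs.map Char.toUpper).getD pos.toNat ' ' = (cs.getD pos.toNat ' ').toUpper := by
      rw [List.getD_eq_getElem _ _ (by simpa using hp), List.getD_eq_getElem _ _ hp,
        List.getElem_map]
    rw [pvFind_runs (cs.map Char.toUpper) pos.toNat (by simpa using hp), hbase]
    rw [pvLeft_eq cs _ pos.toNat (le_of_lt hp), pvRight_eq]
    split_ifs with h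
    · push_cast; ring
    · rfl
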